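-- pv_equiv track=rewrite | github.com/sifykarippery/python_task | main.py | generate_eledia_files_tree
-- ===== SOURCE A (Python) =====
-- def generate_eledia_files_tree(source_dir: str, eledia_file_paths: list):
--     source_folder_index = len(source_dir.split("/"))
--     tree_files = {}
--     for file_path in eledia_file_paths:
--         file_depth = len(file_path.split("/"))-source_folder_index
--         if file_depth in tree_files:
--             tree_files[file_depth].append(file_path)
--             tree_files.update({file_depth: sorted(tree_files[file_depth])})
--         else:
--             tree_files.update({file_depth: [file_path]})
--     return tree_files
-- ===== SOURCE B (Python) =====
-- def generate_eledia_files_tree(source_dir: str, eledia_file_paths: list):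
--     source_folder_index = len(source_dir.split("/"))
--
--     def depth(p):
--         return len(p.split("/")) - source_folder_index
--
--     ordered = sorted(eledia_file_paths)
--     return {d: [p for p in ordered if depth(p) == d]
--             for d in dict.fromkeys(map(depth, eledia_file_paths))}
-- ===== Notes on version B (the rewrite author's own statement) =====
-- stated objective: faster
-- what changed: A incrementally maintains a dict, re-sorting a depth bucket on every insertion; B sorts the whole input once and builds the result by a comprehension over the deduplicated depth list, filtering the globally sorted list per depth (stability of sort keeps each bucket exactly A's sorted bucket, and dict.fromkeys preserves A's first-appearance key order).
import Mathlib
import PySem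

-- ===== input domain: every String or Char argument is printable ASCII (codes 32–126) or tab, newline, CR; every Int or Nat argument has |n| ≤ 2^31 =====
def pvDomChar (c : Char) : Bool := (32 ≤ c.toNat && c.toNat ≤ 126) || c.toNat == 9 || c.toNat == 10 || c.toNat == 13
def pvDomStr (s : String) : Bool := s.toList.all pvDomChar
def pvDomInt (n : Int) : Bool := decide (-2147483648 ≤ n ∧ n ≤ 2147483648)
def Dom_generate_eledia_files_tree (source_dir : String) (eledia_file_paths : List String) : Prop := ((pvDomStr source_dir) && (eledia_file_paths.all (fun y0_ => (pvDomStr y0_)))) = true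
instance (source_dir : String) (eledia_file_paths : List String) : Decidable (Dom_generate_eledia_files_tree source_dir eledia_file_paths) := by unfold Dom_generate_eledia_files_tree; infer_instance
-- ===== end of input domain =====

-- B sorts the whole input once and builds the dict by a comprehension over the deduplicated
-- depth list, filtering the globally sorted list per depth, instead of A's incremental dict
-- with a per-insertion re-sort. Return-value equivalence (including key order).

-- ===== PORT A =====
-- len(s.split("/")) : "/" is a nonempty separator, so split is PySem.Chars.splitOn (exact)
def pvDepthIndex (s : String) : Int :=
  ((PySem.Chars.splitOn s.toList ['/']).length : Int)

def generate_eledia_files_tree (source_dir : String) (eledia_file_paths : List String) : List (Int × List String) :=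
  let source_folder_index := pvDepthIndex source_dir
  let tree_files : PySem.Dict Int (List String) :=
    eledia_file_paths.foldl
      (fun tree_files file_path =>
        let file_depth := pvDepthIndex file_path - source_folder_index
        match tree_files.get? file_depth with
        | some v =>
            -- tree_files[file_depth].append(file_path); tree_files.update({file_depth: sorted(...)})
            tree_files.insert file_depth (PySem.List.sorted (v ++ [file_path]) (fun x => x) false)
        | none => tree_files.insert file_depth [file_path])
      PySem.Dict.empty
  tree_files.items

-- ===== PORT B =====
def generate_eledia_files_tree_alt (source_dir : String) (eledia_file_paths : List String) : List (Int × List String) :=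
  let source_folder_index := pvDepthIndex source_dir
  -- depth(p) = len(p.split("/")) - source_folder_index
  let depth : String → Int := fun p => pvDepthIndex p - source_folder_index
  -- ordered = sorted(eledia_file_paths)
  let ordered := PySem.List.sorted eledia_file_paths (fun x => x) false
  -- {d: [p for p in ordered if depth(p) == d] for d in dict.fromkeys(map(depth, eledia_file_paths))}
  (PySem.List.dedup (eledia_file_paths.map depth)).map
    (fun d => (d, ordered.filter (fun p => depth p == d)))

-- ===== PRECONDITION & SPEC =====
def Spec_generate_eledia_files_tree (source_dir : String) (eledia_file_paths : List String) (out : List (Int × List String)) : Prop := out = generate_eledia_files_tree_alt source_dir eledia_file_paths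
instance (source_dir : String) (eledia_file_paths : List String) (out : List (Int × List String)) : Decidable (Spec_generate_eledia_files_tree source_dir eledia_file_paths out) := by unfold Spec_generate_eledia_files_tree; infer_instance

-- ===== CLAIM (what is proved, stated in full; the proofs are below) =====
def Claim_equal_generate_eledia_files_tree : Prop := ∀ (source_dir : String) (eledia_file_paths : List String), Dom_generate_eledia_files_tree source_dir eledia_file_paths → Spec_generate_eledia_files_tree source_dir eledia_file_paths (generate_eledia_files_tree source_dir eledia_file_paths)

-- ===== LEMMAS AND PROOFS =====

-- the bucket multiset A keeps at key d after processing l, already sorted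
def pvBucket (sfi : Int) (l : List String) (d : Int) : List String :=
  PySem.List.sorted (l.filter (fun p => pvDepthIndex p - sfi == d)) (fun x => x) false

-- A's dict after processing l, as an items list
def pvModel (sfi : Int) (l : List String) : List (Int × List String) :=
  (PySem.List.dedup (l.map (fun p => pvDepthIndex p - sfi))).map
    (fun d => (d, pvBucket sfi l d))

theorem pv_get?_mk_map (ks : List Int) (g : Int → List String) (x : Int) :
    (PySem.Dict.mk (ks.map fun k => (k, g k))).get? x
      = if x ∈ ks then some (g x) else none := by
  induction ks with
  | nil => rfl
  | cons k ks ih =>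
      simp only [List.map_cons, PySem.Dict.get?_mk_cons, ih, List.mem_cons]
      by_cases h : k = x
      · simp [h]
      · simp [h, Ne.symm h]

theorem pv_sorted_append_sorted (xs : List String) (p : String) :
    PySem.List.sorted (PySem.List.sorted xs (fun x => x) false ++ [p]) (fun x => x) false
      = PySem.List.sorted (xs ++ [p]) (fun x => x) false :=
  PySem.List.sorted_eq_sorted_of_perm _ _ (fun x => x) (fun _ _ h => h)
    ((PySem.List.sorted_perm xs (fun x => x) false).append_right [p])

theorem pvModel_step (sfi : Int) (l : List String) (p : String) :
    (match (PySem.Dict.mk (pvModel sfi l)).get? (pvDepthIndex p - sfi) with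
      | some v => (PySem.Dict.mk (pvModel sfi l)).insert (pvDepthIndex p - sfi)
          (PySem.List.sorted (v ++ [p]) (fun x => x) false)
      | none => (PySem.Dict.mk (pvModel sfi l)).insert (pvDepthIndex p - sfi) [p])
      = PySem.Dict.mk (pvModel sfi (l ++ [p])) := by
  have hget : ∀ x, (PySem.Dict.mk (pvModel sfi l)).get? x
      = if x ∈ l.map (fun q => pvDepthIndex q - sfi) then some (pvBucket sfi l x) else none := by
    intro x
    rw [pvModel, pv_get?_mk_map]
    simp [PySem.List.dedup_eq_ofList, PySem.Set.mem_ofList]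
  have hdd : PySem.List.dedup ((l ++ [p]).map (fun q => pvDepthIndex q - sfi))
      = PySem.Set.add (PySem.List.dedup (l.map (fun q => pvDepthIndex q - sfi))) (pvDepthIndex p - sfi) := by
    simp [PySem.List.dedup_eq_ofList, PySem.Set.ofList_append_singleton]
  by_cases hmem : (pvDepthIndex p - sfi) ∈ l.map (fun q => pvDepthIndex q - sfi)
  · -- existing depth: overwrite in place
    rw [hget]
    simp only [hmem, if_pos]
    apply PySem.Dict.ext
    rw [PySem.Dict.items_insert_of_contains]
    · show (pvModel sfi l).map _ = pvModel sfi (l ++ [p])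
      have hdd' : PySem.List.dedup ((l ++ [p]).map (fun q => pvDepthIndex q - sfi))
          = PySem.List.dedup (l.map (fun q => pvDepthIndex q - sfi)) := by
        rw [hdd, PySem.Set.add]
        have hex : ∃ a ∈ l, pvDepthIndex a = pvDepthIndex p := by
          obtain ⟨a, ha, hb⟩ := List.mem_map.mp hmem
          exact ⟨a, ha, by omega⟩
        simp [hex]
      rw [pvModel, pvModel, hdd', List.map_map]
      apply List.map_congr_left
      intro d _
      by_cases hd : d = pvDepthIndex p - sfi
      · subst hd
        simp only [Function.comp, beq_self_eq_true, if_pos]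
        simp [pvBucket, List.filter_append, pv_sorted_append_sorted]
      · have : (d == pvDepthIndex p - sfi) = false := by simp [hd]
        simp only [Function.comp, this]
        simp only [Bool.false_eq_true, if_false]
        have hf : ((l ++ [p]).filter (fun q => pvDepthIndex q - sfi == d))
            = l.filter (fun q => pvDepthIndex q - sfi == d) := by
          have : (pvDepthIndex p - sfi == d) = false := by simp [Ne.symm hd]
          simp [List.filter_append, this]
        simp [pvBucket, hf]
    · rw [PySem.Dict.contains_eq_isSome_get?, hget]
      simp [hmem]
  · -- new depth: append
    rw [hget]
    simp only [hmem, if_false]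
    apply PySem.Dict.ext
    rw [PySem.Dict.items_insert_of_not_contains]
    · show pvModel sfi l ++ [(pvDepthIndex p - sfi, [p])] = pvModel sfi (l ++ [p])
      have hdd' : PySem.List.dedup ((l ++ [p]).map (fun q => pvDepthIndex q - sfi))
          = PySem.List.dedup (l.map (fun q => pvDepthIndex q - sfi)) ++ [pvDepthIndex p - sfi] := by
        rw [hdd, PySem.Set.add]
        have hnone : ∀ x ∈ l, ¬pvDepthIndex x = pvDepthIndex p :=
          fun x hx hEq => hmem (List.mem_map.mpr ⟨x, hx, by omega⟩)
        simp
        exact hnone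
      rw [pvModel, pvModel, hdd', List.map_append]
      congr 1
      · apply List.map_congr_left
        intro d hdmem
        have hd : d ≠ pvDepthIndex p - sfi := by
          have hin : d ∈ l.map (fun q => pvDepthIndex q - sfi) := by
            simpa [PySem.List.dedup_eq_ofList, PySem.Set.mem_ofList] using hdmem
          exact fun h => hmem (h ▸ hin)
        have : (pvDepthIndex p - sfi == d) = false := by simp [Ne.symm hd]
        simp [pvBucket, List.filter_append, this]
      · have hfil : l.filter (fun q => pvDepthIndex q - sfi == pvDepthIndex p - sfi) = [] := by
          rw [List.filter_eq_nil_iff]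
          intro a ha hb
          exact hmem (List.mem_map.mpr ⟨a, ha, by simpa using hb⟩)
        simp only [List.map_cons, List.map_nil]
        congr 2
        simp only [pvBucket, List.filter_append, hfil, List.nil_append]
        simp only [beq_self_eq_true, List.filter_cons_of_pos, List.filter_nil]
        exact PySem.List.sorted_eq_self_of_pairwise [p] (fun x => x) (List.pairwise_singleton _ _)
    · rw [PySem.Dict.contains_eq_isSome_get?, hget]
      simp [hmem]

theorem pvFoldA (sfi : Int) (l : List String) :
    l.foldl
      (fun tree_files file_path =>
        let file_depth := pvDepthIndex file_path - sfi
        match tree_files.get? file_depth with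
        | some v => tree_files.insert file_depth (PySem.List.sorted (v ++ [file_path]) (fun x => x) false)
        | none => tree_files.insert file_depth [file_path])
      PySem.Dict.empty
    = PySem.Dict.mk (pvModel sfi l) := by
  induction l using List.reverseRecOn with
  | nil => rfl
  | append_singleton l p ih =>
      rw [List.foldl_append, List.foldl_cons, List.foldl_nil, ih]
      exact pvModel_step sfi l p

theorem pv_sorted_filter (l : List String) (pred : String → Bool) :
    PySem.List.sorted (l.filter pred) (fun x => x) false
      = (PySem.List.sorted l (fun x => x) false).filter pred :=
  PySem.List.sorted_id_eq_of_perm_of_pairwise _ _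
    ((PySem.List.sorted_perm l (fun x => x) false).filter pred)
    ((PySem.List.sorted_pairwise l (fun x => x)).sublist List.filter_sublist)

-- ===== VERDICT (by name: the statement is the Claim_ definition above) =====
theorem generate_eledia_files_tree_spec : Claim_equal_generate_eledia_files_tree := by
  intro source_dir eledia_file_paths _
  show (eledia_file_paths.foldl
        (fun tree_files file_path =>
          let file_depth := pvDepthIndex file_path - pvDepthIndex source_dir
          match tree_files.get? file_depth with
          | some v => tree_files.insert file_depth (PySem.List.sorted (v ++ [file_path]) (fun x => x) false)
          | none => tree_files.insert file_depth [file_path])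
        PySem.Dict.empty).items
      = (PySem.List.dedup (eledia_file_paths.map (fun p => pvDepthIndex p - pvDepthIndex source_dir))).map
          (fun d => (d, (PySem.List.sorted eledia_file_paths (fun x => x) false).filter
            (fun p => pvDepthIndex p - pvDepthIndex source_dir == d)))
  rw [pvFoldA]
  show pvModel (pvDepthIndex source_dir) eledia_file_paths = _
  rw [pvModel]
  apply List.map_congr_left
  intro d _
  rw [pvBucket, pv_sorted_filter]
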